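-- pv_equiv track=rewrite | github.com/QGrain/SyzGPT | extractor/extract_syz_dependencies.py | recur_search_depend
-- ===== SOURCE A (Python) =====
-- def recur_search_depend(d_depend, call, depth=1):
--     if depth == 1:
--         if call in d_depend:
--             return d_depend[call]
--         else:
--             return set()
--     s = set()
--     if call in d_depend:
--         for c in d_depend[call]:
--             s = s | recur_search_depend(d_depend, c, depth-1)
--     return s
-- ===== SOURCE B (Python) =====
-- def recur_search_depend(d_depend, call, depth=1):
--     if depth == 1:
--         return d_depend[call] if call in d_depend else set()
--     if depth < 1:
--         return set()
--     frontier = {call}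
--     for _ in range(depth):
--         if not frontier:
--             break
--         frontier = {c for u in frontier if u in d_depend for c in d_depend[u]}
--     return frontier
-- ===== Notes on version B (the rewrite author's own statement) =====
-- stated objective: alternative
-- what changed: Replaced the per-path depth-recursion (which revisits a node once for every path leading to it and unions the recursive result sets) by an iterative frontier/level-set loop that advances one deduplicated frontier set per depth step, with an early break on an empty frontier and an explicit empty result for depth < 1.
-- outside the precondition, e.g. on recur_search_depend({'a': {'b'}, 'b': {'c'}}, 'a', 0): A returns set(), B returns set()
import Mathlib
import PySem

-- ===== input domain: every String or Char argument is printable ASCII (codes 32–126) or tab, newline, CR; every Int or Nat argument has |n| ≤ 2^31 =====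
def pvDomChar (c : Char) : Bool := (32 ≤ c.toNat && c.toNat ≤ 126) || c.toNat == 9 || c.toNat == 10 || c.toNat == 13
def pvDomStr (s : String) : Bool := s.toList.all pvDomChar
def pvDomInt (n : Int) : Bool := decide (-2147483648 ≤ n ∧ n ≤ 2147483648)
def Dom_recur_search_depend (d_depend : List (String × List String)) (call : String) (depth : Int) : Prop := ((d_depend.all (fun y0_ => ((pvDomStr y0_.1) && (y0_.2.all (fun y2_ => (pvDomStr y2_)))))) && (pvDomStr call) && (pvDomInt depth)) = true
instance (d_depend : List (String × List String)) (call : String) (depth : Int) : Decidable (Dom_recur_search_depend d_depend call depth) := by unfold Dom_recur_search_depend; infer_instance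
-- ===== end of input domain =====

-- B replaces A's per-path recursion (set union over recursive calls) by an iterative frontier (level-set) loop; equivalence of the RETURN value on depth ≥ 1.

-- ===== PORT A =====
def recur_search_depend (d_depend : List (String × List String)) (call : String) (depth : Int) : List String :=
  if depth = 1 then
    match (PySem.Dict.mk d_depend).get? call with
    | some l => l
    | none => []
  else
    match (PySem.Dict.mk d_depend).get? call with
    | none => []      -- 'call in d_depend' false: the loop is skipped, s stays set()
    | some cs =>
      if depth ≤ 0 then []
        -- totality guard, outside Pre_: for depth ≤ 0 Python recurses with ever-decreasing
        -- depth and returns set() whenever that recursion terminates at all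
      else cs.foldl (fun s c => PySem.Set.union s (recur_search_depend d_depend c (depth - 1))) []
termination_by depth.toNat
decreasing_by omega

-- ===== PORT B =====
-- one step: {c for u in frontier if u in d_depend for c in d_depend[u]}
def pvStepB (d_depend : List (String × List String)) (frontier : PySem.Set String) : PySem.Set String :=
  frontier.foldl (fun acc u =>
    match (PySem.Dict.mk d_depend).get? u with
    | some cs => cs.foldl PySem.Set.add acc
    | none => acc) []

-- 'for _ in range(depth): if not frontier: break; frontier = step(frontier)'
def pvLoopB (d_depend : List (String × List String)) : Nat → PySem.Set String → PySem.Set String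
  | 0, frontier => frontier
  | n + 1, frontier => if frontier = [] then frontier else pvLoopB d_depend n (pvStepB d_depend frontier)

def recur_search_depend_alt (d_depend : List (String × List String)) (call : String) (depth : Int) : List String :=
  if depth = 1 then
    match (PySem.Dict.mk d_depend).get? call with
    | some l => l
    | none => []
  else if depth < 1 then []
  else
    pvLoopB d_depend depth.toNat (PySem.Set.ofList [call])

-- ===== PRECONDITION & SPEC =====
-- Pre_ admits all of depth ≥ 1 (the natural domain) and, for depth < 1, the inputs where call is
-- not a key or no key's children contain a key: for depth < 1 A recurses with ever-decreasing depth,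
-- diverging (RecursionError) whenever a key-cycle is reachable from call and returning an empty set
-- whenever the recursion dies out (as it provably does in the two admitted cases; B returns the empty
-- set on all of depth < 1); the remaining depth < 1 inputs are excluded because the divergent ones
-- among them admit no closed-form description short of cycle-reachability.
def Pre_recur_search_depend (d_depend : List (String × List String)) (call : String) (depth : Int) : Prop :=
  1 ≤ depth ∨ (PySem.Dict.mk d_depend).get? call = none
    ∨ ∀ p ∈ d_depend, ∀ c ∈ p.2, (PySem.Dict.mk d_depend).get? c = none
instance (d_depend : List (String × List String)) (call : String) (depth : Int) : Decidable (Pre_recur_search_depend d_depend call depth) := by unfold Pre_recur_search_depend; infer_instance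
def pvWitness_recur_search_depend : (List (String × List String)) × String × Int := ([("a", ["b"])], "a", 2)

def Spec_recur_search_depend (d_depend : List (String × List String)) (call : String) (depth : Int) (out : List String) : Prop := out = recur_search_depend_alt d_depend call depth
instance (d_depend : List (String × List String)) (call : String) (depth : Int) (out : List String) : Decidable (Spec_recur_search_depend d_depend call depth out) := by unfold Spec_recur_search_depend; infer_instance

-- ===== CLAIM (what is proved, stated in full; the proofs are below) =====
def Claim_equal_recur_search_depend : Prop := ∀ (d_depend : List (String × List String)) (call : String) (depth : Int), Dom_recur_search_depend d_depend call depth → Pre_recur_search_depend d_depend call depth → Spec_recur_search_depend d_depend call depth (recur_search_depend d_depend call depth)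

-- ===== LEMMAS AND PROOFS =====

-- children of u in the dependency dict ([] when u is not a key)
def pvCh (d : List (String × List String)) (u : String) : List String :=
  ((PySem.Dict.mk d).get? u).getD []

-- the (duplicate-keeping) level enumeration: n flatMap-steps from the list l
def pvRawFrom (d : List (String × List String)) : Nat → List String → List String
  | 0, l => l
  | n + 1, l => pvRawFrom d n (l.flatMap (pvCh d))


theorem pvUpdate_add (s u : PySem.Set String) (x : String) :
    PySem.Set.update s (PySem.Set.add u x) = PySem.Set.add (PySem.Set.update s u) x := by
  by_cases h : x ∈ u
  · rw [PySem.Set.add_of_mem h, PySem.Set.add_of_mem (by exact (PySem.Set.mem_update s u x).mpr (Or.inr h))]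
  · rw [PySem.Set.add_of_not_mem h, PySem.Set.update_append, PySem.Set.update_cons, PySem.Set.update_nil]


theorem pvUpdate_update (t : List String) (u s : PySem.Set String) :
    PySem.Set.update s (PySem.Set.update u t) = PySem.Set.update (PySem.Set.update s u) t := by
  induction t generalizing u s with
  | nil => rw [PySem.Set.update_nil, PySem.Set.update_nil]
  | cons x t ih =>
    rw [PySem.Set.update_cons, PySem.Set.update_cons, ih, pvUpdate_add]


theorem pvUpdate_self_of_subset (s : PySem.Set String) (L : List String) (h : ∀ x ∈ L, x ∈ s) :
    PySem.Set.update s L = s := by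
  induction L generalizing s with
  | nil => rw [PySem.Set.update_nil]
  | cons x L ih =>
    rw [PySem.Set.update_cons, PySem.Set.add_of_mem (h x (by simp))]
    exact ih s (fun y hy => h y (by simp [hy]))


theorem pvFlatMap_dedup (d : List (String × List String)) (L : List String) (t s : PySem.Set String) :
    PySem.Set.update s ((PySem.Set.update t L).flatMap (pvCh d)) =
      PySem.Set.update (PySem.Set.update s (t.flatMap (pvCh d))) (L.flatMap (pvCh d)) := by
  induction L generalizing t s with
  | nil => simp [PySem.Set.update_nil]
  | cons x L ih =>
    rw [List.flatMap_cons, PySem.Set.update_cons, ih, PySem.Set.update_append]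
    by_cases h : x ∈ t
    · rw [PySem.Set.add_of_mem h]
      congr 1
      refine (pvUpdate_self_of_subset _ _ (fun y hy => ?_)).symm
      exact (PySem.Set.mem_update s _ y).mpr (Or.inr (List.mem_flatMap.mpr ⟨x, h, hy⟩))
    · rw [PySem.Set.add_of_not_mem h, List.flatMap_append, PySem.Set.update_append]
      simp [pvCh]


theorem pvRawFrom_nil (d : List (String × List String)) (n : Nat) : pvRawFrom d n [] = [] := by
  induction n with
  | zero => rfl
  | succ n ih => simpa [pvRawFrom] using ih


theorem pvRawFrom_append (d : List (String × List String)) (n : Nat) (a b : List String) :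
    pvRawFrom d n (a ++ b) = pvRawFrom d n a ++ pvRawFrom d n b := by
  induction n generalizing a b with
  | zero => rfl
  | succ n ih => simp [pvRawFrom, List.flatMap_append, ih]


theorem pvRawFrom_flatMap (d : List (String × List String)) (n : Nat) (f : String → List String) (l : List String) :
    l.flatMap (fun c => pvRawFrom d n (f c)) = pvRawFrom d n (l.flatMap f) := by
  induction l with
  | nil => simp [pvRawFrom_nil]
  | cons x l ih => simp [List.flatMap_cons, pvRawFrom_append, ih]


theorem pvStepB_eq (d : List (String × List String)) (F : PySem.Set String) :
    pvStepB d F = PySem.Set.update [] (F.flatMap (pvCh d)) := by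
  have hstep : ∀ (F : List String) (s : PySem.Set String),
      F.foldl (fun acc u =>
        match (PySem.Dict.mk d).get? u with
        | some cs => cs.foldl PySem.Set.add acc
        | none => acc) s = PySem.Set.update s (F.flatMap (pvCh d)) := by
    intro F
    induction F with
    | nil => intro s; rw [List.foldl_nil, List.flatMap_nil, PySem.Set.update_nil]
    | cons u F ih =>
      intro s
      rw [List.foldl_cons, List.flatMap_cons, PySem.Set.update_append, ih]
      congr 1
      unfold pvCh
      cases (PySem.Dict.mk d).get? u with
      | none => show s = PySem.Set.update s []; rw [PySem.Set.update_nil]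
      | some cs => rfl
  exact hstep F []


theorem pvOfList_ne_nil (x : String) (L : List String) : PySem.Set.ofList (x :: L) ≠ [] := by
  intro h
  have : x ∈ PySem.Set.ofList (x :: L) := (PySem.Set.mem_ofList _ _).mpr (by simp)
  rw [h] at this
  exact (List.not_mem_nil) this


theorem pvLoopB_ofList (d : List (String × List String)) (n : Nat) (L : List String) :
    pvLoopB d n (PySem.Set.ofList L) = PySem.Set.ofList (pvRawFrom d n L) := by
  induction n generalizing L with
  | zero => rfl
  | succ n ih =>
    rw [pvLoopB]
    by_cases h : PySem.Set.ofList L = []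
    · cases L with
      | nil => simp [h, pvRawFrom_nil]
      | cons x L => exact absurd h (pvOfList_ne_nil x L)
    · rw [if_neg h, pvStepB_eq]
      have hof : PySem.Set.ofList L = PySem.Set.update [] L := rfl
      rw [hof, pvFlatMap_dedup d L [] []]
      simp only [List.flatMap_nil, PySem.Set.update_nil]
      have : PySem.Set.update [] (L.flatMap (pvCh d)) = PySem.Set.ofList (L.flatMap (pvCh d)) := rfl
      rw [this, ih]
      rfl


theorem pvFoldl_update (g : String → List String) (l : List String) (s : PySem.Set String) :
    l.foldl (fun s c => PySem.Set.update s (g c)) s = PySem.Set.update s (l.flatMap g) := by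
  induction l generalizing s with
  | nil => rw [List.foldl_nil, List.flatMap_nil, PySem.Set.update_nil]
  | cons x l ih => rw [List.foldl_cons, List.flatMap_cons, PySem.Set.update_append, ih]


theorem pvRecurA_depth1 (d : List (String × List String)) (c : String) :
    recur_search_depend d c 1 = pvCh d c := by
  rw [recur_search_depend]
  unfold pvCh
  cases (PySem.Dict.mk d).get? c <;> rfl


theorem pvLemA (d : List (String × List String)) (k : Nat) (l : List String) (s : PySem.Set String) :
    l.foldl (fun s c => PySem.Set.union s (recur_search_depend d c ((k : Int) + 1))) s =
      PySem.Set.update s (pvRawFrom d k (l.flatMap (pvCh d))) := by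
  induction k generalizing l s with
  | zero =>
    have hfun : (fun (s : PySem.Set String) (c : String) =>
        PySem.Set.union s (recur_search_depend d c ((0 : Nat) + 1))) =
        (fun (s : PySem.Set String) (c : String) => PySem.Set.update s (pvCh d c)) := by
      funext s c
      have : ((0 : Nat) : Int) + 1 = 1 := by norm_num
      rw [this, pvRecurA_depth1]
      rfl
    rw [hfun, pvFoldl_update]
    rfl
  | succ k ih =>
    have hone : ∀ c : String, recur_search_depend d c (((k + 1 : Nat) : Int) + 1) =
        PySem.Set.update [] (pvRawFrom d k ((pvCh d c).flatMap (pvCh d))) := by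
      intro c
      rw [recur_search_depend]
      have h1 : ¬ (((k + 1 : Nat) : Int) + 1 = 1) := by push_cast; omega
      rw [if_neg h1]
      unfold pvCh
      cases hg : (PySem.Dict.mk d).get? c with
      | none =>
        simp only [Option.getD_none, List.flatMap_nil, pvRawFrom_nil, PySem.Set.update_nil]
      | some cs =>
        have h0 : ¬ (((k + 1 : Nat) : Int) + 1 ≤ 0) := by push_cast; omega
        dsimp only
        rw [if_neg h0]
        have harg : ((k + 1 : Nat) : Int) + 1 - 1 = ((k : Nat) : Int) + 1 := by push_cast; ring
        simp only [harg]
        rw [ih cs []]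
        rfl
    have hfun : (fun (s : PySem.Set String) (c : String) =>
        PySem.Set.union s (recur_search_depend d c (((k + 1 : Nat) : Int) + 1))) =
        (fun (s : PySem.Set String) (c : String) =>
          PySem.Set.update s (pvRawFrom d k ((pvCh d c).flatMap (pvCh d)))) := by
      funext s c
      show PySem.Set.update s (recur_search_depend d c (((k + 1 : Nat) : Int) + 1)) = _
      rw [hone c]
      rw [pvUpdate_update, PySem.Set.update_nil]
    rw [hfun, pvFoldl_update]
    congr 1
    rw [pvRawFrom_flatMap]
    show _ = pvRawFrom d (k + 1) (l.flatMap (pvCh d))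
    rw [pvRawFrom]
    congr 1
    rw [List.flatMap_assoc]


-- ===== VERDICT (by name: the statement is the Claim_ definition above) =====
theorem recur_search_depend_spec : Claim_equal_recur_search_depend := by
  intro d call depth _dom _hpre
  unfold Spec_recur_search_depend
  by_cases h1 : depth = 1
  · subst h1
    rw [recur_search_depend, recur_search_depend_alt, if_pos rfl, if_pos rfl]
  · by_cases hle : depth ≤ 0
    · rw [recur_search_depend, recur_search_depend_alt, if_neg h1, if_neg h1,
        if_pos (show depth < 1 by omega)]
      cases (PySem.Dict.mk d).get? call with
      | none => rfl
      | some cs => simp [if_pos hle]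
    · obtain ⟨k, hk⟩ : ∃ k : Nat, depth = (k : Int) + 2 := ⟨(depth - 2).toNat, by omega⟩
      subst hk
      rw [recur_search_depend, recur_search_depend_alt, if_neg h1, if_neg h1,
        if_neg (show ¬ ((k : Int) + 2 < 1) by omega)]
      have htn : ((k : Int) + 2).toNat = k + 2 := by omega
      rw [htn]
      rw [pvLoopB_ofList d (k + 2) [call]]
      have hraw : pvRawFrom d (k + 2) [call] = pvRawFrom d k ((pvCh d call).flatMap (pvCh d)) := by
        show pvRawFrom d (k + 2) [call] = _
        rw [pvRawFrom, pvRawFrom]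
        congr 1
        simp [List.flatMap_cons]
      rw [hraw]
      cases hg : (PySem.Dict.mk d).get? call with
      | none =>
        have hch : pvCh d call = [] := by unfold pvCh; rw [hg]; rfl
        rw [hch]
        simp [pvRawFrom_nil]
      | some cs =>
        have h0 : ¬ ((k : Int) + 2 ≤ 0) := by omega
        dsimp only
        rw [if_neg h0]
        have harg : (k : Int) + 2 - 1 = (k : Int) + 1 := by ring
        simp only [harg]
        rw [pvLemA d k cs []]
        have hch : pvCh d call = cs := by unfold pvCh; rw [hg]; rfl
        rw [hch]
        rfl
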